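-- pv_equiv track=rewrite | github.com/vinchinzu/euler | python/890.py | partition_recursive_memo
-- ===== SOURCE A (Python) =====
-- from functools import lru_cache
--
-- def partition_recursive_memo(n, mod=10**9 + 7):
--     """
--     Recursive solution with memoization for computing p(n).
--
--     The idea: recursively compute p(n) by considering how many times
--     we use the largest power of 2 <= n.
--     """
--     @lru_cache(maxsize=None)
--     def p(remaining, max_power_of_2):
--         """
--         Count partitions of 'remaining' using powers of 2 up to 'max_power_of_2'.
--
--         remaining: the number left to partition
--         max_power_of_2: largest power of 2 we can use (as an exponent, so 2^max_power_of_2)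
--         """
--         if remaining == 0:
--             return 1
--
--         if max_power_of_2 < 0:
--             return 0
--
--         # Calculate the actual power value
--         power_value = 1 << max_power_of_2  # 2^max_power_of_2
--
--         # We can use this power 0, 1, 2, ... times
--         total = 0
--         times_used = 0
--
--         while times_used * power_value <= remaining:
--             # Use this power 'times_used' times, then partition the rest
--             rest = remaining - times_used * power_value
--             total = (total + p(rest, max_power_of_2 - 1)) % mod
--             times_used += 1
--
--         return total
--
--     # Find the highest power of 2 <= n
--     if n == 0:
--         return 1
--
--     max_power = n.bit_length() - 1
--
--     return p(n, max_power)
-- ===== SOURCE B (Python) =====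
-- def partition_recursive_memo(n, mod=10**9 + 7):
--     """Bottom-up unbounded-knapsack DP over the powers of 2 (one table, no recursion)."""
--     if n <= 0:
--         return 1 if n == 0 else 0
--     dp = [1] + [0] * n
--     p = 1
--     while p <= n:
--         for j in range(p, n + 1):
--             dp[j] = (dp[j] + dp[j - p]) % mod
--         p *= 2
--     return dp[n]
-- ===== Notes on version B (the rewrite author's own statement) =====
-- stated objective: faster
-- what changed: Replaced the memoized recursion that enumerates how many times each power of 2 is used (an inner while-loop per state) by a bottom-up unbounded-knapsack DP table dp[j] = (dp[j] + dp[j-p]) % mod swept once per power of 2.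
import Mathlib
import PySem

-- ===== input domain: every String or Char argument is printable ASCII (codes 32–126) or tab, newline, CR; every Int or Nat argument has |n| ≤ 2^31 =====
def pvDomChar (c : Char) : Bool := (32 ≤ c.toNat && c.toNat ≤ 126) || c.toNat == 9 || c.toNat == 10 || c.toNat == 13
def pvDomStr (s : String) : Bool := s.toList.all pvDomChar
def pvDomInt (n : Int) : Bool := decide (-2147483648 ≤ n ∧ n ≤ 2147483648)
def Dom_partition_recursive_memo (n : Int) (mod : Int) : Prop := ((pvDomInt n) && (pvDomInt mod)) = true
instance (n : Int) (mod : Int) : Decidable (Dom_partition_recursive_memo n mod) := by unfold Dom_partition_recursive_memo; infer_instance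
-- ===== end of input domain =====

-- B replaces A's memoized multiplicity recursion by a bottom-up unbounded-knapsack DP
-- table over the powers of 2 (measured faster; return value only, no observable mutation).


-- ===== PORT A =====
-- the inner `while times_used * power_value <= remaining` loop of A's helper p;
-- pk is (a reference to) the recursive call p(·, max_power_of_2 - 1)
def loopA (m : Int) (pk : Int → Int) (k : Nat) (r : Int) (t total : Int) : Int :=
  if t * 2 ^ k ≤ r then
    loopA m pk k r (t + 1) (PySem.Int.mod (total + pk (r - t * 2 ^ k)) m)
  else total
termination_by (r + 2 ^ k - t * 2 ^ k).toNat
decreasing_by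
  have hv : (0:Int) < 2 ^ k := pow_pos (by norm_num) k
  have h2 : (t + 1) * 2 ^ k = t * 2 ^ k + 2 ^ k := by ring
  omega

-- A's helper p(remaining, max_power_of_2), with the exponent max_power_of_2
-- encoded as fuel = max_power_of_2 + 1 (fuel 0 is the `max_power_of_2 < 0` branch)
def pA (m : Int) : Nat → Int → Int
  | 0, r => if r = 0 then 1 else 0
  | k + 1, r => if r = 0 then 1 else loopA m (fun x => pA m k x) k r 0 0

def partition_recursive_memo (n : Int) (mod : Int) : Int :=
  if n = 0 then 1
  else pA mod (PySem.Int.bitLength n) n   -- max_power = n.bit_length() - 1, fuel = max_power + 1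

-- ===== PORT B =====
-- one dp[j] = (dp[j] + dp[j-p]) % mod update of Source B's inner loop
def stepB (m p : Int) (d : List Int) (j : Int) : List Int :=
  d.set j.toNat (PySem.Int.mod (d.getD j.toNat 0 + d.getD (j - p).toNat 0) m)

-- Source B's `for j in range(p, n+1)` pass
def innerB (m n p : Int) (dp : List Int) : List Int :=
  (PySem.List.pyRange p (n + 1) 1).foldl (stepB m p) dp

-- Source B's `while p <= n: ...; p *= 2` loop (fuel only makes it total; it is ample)
def outerB (m n : Int) : Nat → Int → List Int → List Int
  | 0, _, dp => dp
  | f + 1, p, dp => if p ≤ n then outerB m n f (p * 2) (innerB m n p dp) else dp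

def partition_recursive_memo_alt (n : Int) (mod : Int) : Int :=
  if n ≤ 0 then (if n = 0 then 1 else 0)
  else (outerB mod n (n.toNat + 1) 1 (1 :: List.replicate n.toNat 0)).getD n.toNat 0

-- ===== PRECONDITION & SPEC =====
-- Pre_ excludes exactly the inputs where A raises (ZeroDivisionError: n > 0 with mod = 0)
def Pre_partition_recursive_memo (n : Int) (mod : Int) : Prop := 0 < n → mod ≠ 0
instance (n : Int) (mod : Int) : Decidable (Pre_partition_recursive_memo n mod) := by unfold Pre_partition_recursive_memo; infer_instance
def pvWitness_partition_recursive_memo : Int × Int := (6, 1000000007)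

def Spec_partition_recursive_memo (n : Int) (mod : Int) (out : Int) : Prop := out = partition_recursive_memo_alt n mod
instance (n : Int) (mod : Int) (out : Int) : Decidable (Spec_partition_recursive_memo n mod out) := by unfold Spec_partition_recursive_memo; infer_instance

-- ===== CLAIM (what is proved, stated in full; the proofs are below) =====
def Claim_equal_partition_recursive_memo : Prop := ∀ (n : Int) (mod : Int), Dom_partition_recursive_memo n mod → Pre_partition_recursive_memo n mod → Spec_partition_recursive_memo n mod (partition_recursive_memo n mod)

-- ===== LEMMAS AND PROOFS =====

-- mod arithmetic
lemma pvMod_sub (a m : Int) : PySem.Int.mod a m = a - PySem.Int.floordiv a m * m := by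
  have := PySem.Int.floordiv_mul_add_mod a m; omega

lemma pvMod_congr {m : Int} (hm : m ≠ 0) {x y : Int} (h : m ∣ (x - y)) :
    PySem.Int.mod x m = PySem.Int.mod y m := by
  have hx := pvMod_sub x m
  have hy := pvMod_sub y m
  have hdvd : m ∣ (PySem.Int.mod x m - PySem.Int.mod y m) := by
    have e : PySem.Int.mod x m - PySem.Int.mod y m
        = (x - y) - m * (PySem.Int.floordiv x m - PySem.Int.floordiv y m) := by
      rw [hx, hy]; ring
    rw [e]; exact dvd_sub h (dvd_mul_right m _)
  have hb : |PySem.Int.mod x m - PySem.Int.mod y m| < |m| := by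
    rcases lt_or_gt_of_ne hm with hneg | hpos
    · have b1 := PySem.Int.mod_neg_bounds x hneg
      have b2 := PySem.Int.mod_neg_bounds y hneg
      rw [abs_of_neg hneg, abs_lt]; omega
    · have b1 := PySem.Int.mod_nonneg x hpos
      have b2 := PySem.Int.mod_nonneg y hpos
      have c1 := PySem.Int.mod_lt x hpos
      have c2 := PySem.Int.mod_lt y hpos
      rw [abs_of_pos hpos, abs_lt]; omega
  have hz : PySem.Int.mod x m - PySem.Int.mod y m = 0 := by
    rcases hdvd with ⟨c, hc⟩
    rcases eq_or_ne c 0 with rfl | hc0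
    · omega
    · exfalso
      have : |m| * 1 ≤ |m * c| := by
        rw [abs_mul]
        nlinarith [Int.one_le_abs hc0, abs_nonneg m]
      rw [hc] at hb; omega
  omega

lemma pvMod_addl {m : Int} (hm : m ≠ 0) (a b : Int) :
    PySem.Int.mod (PySem.Int.mod a m + b) m = PySem.Int.mod (a + b) m := by
  apply pvMod_congr hm
  refine ⟨-(PySem.Int.floordiv a m), ?_⟩
  have h := pvMod_sub a m
  have hc : m * -(PySem.Int.floordiv a m) = -(PySem.Int.floordiv a m * m) := by ring
  omega

lemma pvMod_addr {m : Int} (hm : m ≠ 0) (a b : Int) :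
    PySem.Int.mod (a + PySem.Int.mod b m) m = PySem.Int.mod (a + b) m := by
  rw [add_comm a, add_comm a, pvMod_addl hm]

lemma pvMod_idem {m : Int} (hm : m ≠ 0) (a : Int) :
    PySem.Int.mod (PySem.Int.mod a m) m = PySem.Int.mod a m := by
  have h := pvMod_addl hm a 0
  simpa using h

lemma pvMod_zero (m : Int) : PySem.Int.mod 0 m = 0 := by
  rw [PySem.Int.mod_eq_zero_iff_dvd]; exact dvd_zero m

-- loopA: shifting the start index by one against removing one power from r
lemma loopA_shift (m : Int) (pk : Int → Int) (k : Nat) :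
    ∀ (N : Nat) (r t a : Int), (r - t * 2 ^ k + 2 ^ k).toNat < N →
      loopA m pk k r (t + 1) a = loopA m pk k (r - 2 ^ k) t a := by
  intro N
  induction N with
  | zero => intro r t a h; omega
  | succ N ih =>
    intro r t a h
    have hv : (0:Int) < 2 ^ k := pow_pos (by norm_num) k
    have h2 : (t + 1) * 2 ^ k = t * 2 ^ k + 2 ^ k := by ring
    conv_lhs => rw [loopA]
    conv_rhs => rw [loopA]
    by_cases hc : t * 2 ^ k ≤ r - 2 ^ k
    · rw [if_pos (by omega), if_pos hc]
      have harg : r - (t + 1) * 2 ^ k = r - 2 ^ k - t * 2 ^ k := by ring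
      rw [harg]
      exact ih r (t + 1) _ (by omega)
    · rw [if_neg (by omega), if_neg hc]

-- loopA: pulling a summand out of the (mod-reduced) accumulator
lemma loopA_acc (m : Int) (hm : m ≠ 0) (pk : Int → Int) (k : Nat) :
    ∀ (N : Nat) (r t a b : Int), (r - t * 2 ^ k + 2 ^ k).toNat < N →
      loopA m pk k r t (PySem.Int.mod (a + b) m)
        = PySem.Int.mod (a + loopA m pk k r t (PySem.Int.mod b m)) m := by
  intro N
  induction N with
  | zero => intro r t a b h; omega
  | succ N ih =>
    intro r t a b h
    have hv : (0:Int) < 2 ^ k := pow_pos (by norm_num) k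
    have h2 : (t + 1) * 2 ^ k = t * 2 ^ k + 2 ^ k := by ring
    conv_lhs => rw [loopA]
    conv_rhs => rw [loopA]
    by_cases hc : t * 2 ^ k ≤ r
    · rw [if_pos hc, if_pos hc]
      have e1 : PySem.Int.mod (PySem.Int.mod (a + b) m + pk (r - t * 2 ^ k)) m
          = PySem.Int.mod (a + (b + pk (r - t * 2 ^ k))) m := by
        rw [pvMod_addl hm, add_assoc]
      have e2 : PySem.Int.mod (PySem.Int.mod b m + pk (r - t * 2 ^ k)) m
          = PySem.Int.mod (b + pk (r - t * 2 ^ k)) m := pvMod_addl hm _ _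
      rw [e1, e2]
      exact ih r (t + 1) a (b + pk (r - t * 2 ^ k)) (by omega)
    · rw [if_neg hc, if_neg hc, pvMod_addr hm]

-- loopA output is mod-reduced whenever its accumulator is
lemma loopA_out (m : Int) (pk : Int → Int) (k : Nat) :
    ∀ (N : Nat) (r t a : Int), (r - t * 2 ^ k + 2 ^ k).toNat < N →
      PySem.Int.mod a m = a →
      PySem.Int.mod (loopA m pk k r t a) m = loopA m pk k r t a := by
  intro N
  induction N with
  | zero => intro r t a h; omega
  | succ N ih =>
    intro r t a h ha
    have hv : (0:Int) < 2 ^ k := pow_pos (by norm_num) k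
    have h2 : (t + 1) * 2 ^ k = t * 2 ^ k + 2 ^ k := by ring
    conv_lhs => rw [loopA]
    conv_rhs => rw [loopA]
    by_cases hc : t * 2 ^ k ≤ r
    · rw [if_pos hc]
      refine ih r (t + 1) _ (by omega) ?_
      by_cases hm0 : m = 0
      · subst hm0; rw [pvMod_sub]; ring
      · exact pvMod_idem hm0 _
    · rw [if_neg hc]; exact ha

lemma pA_zero (m : Int) (f : Nat) : pA m f 0 = 1 := by
  cases f <;> simp [pA]

lemma pA_neg (m : Int) (f : Nat) {r : Int} (hr : r < 0) : pA m f r = 0 := by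
  cases f with
  | zero => simp [pA, show r ≠ 0 by omega]
  | succ k =>
    rw [pA, if_neg (by omega), loopA, if_neg (by simp; omega)]

lemma pA_mod (m : Int) (f : Nat) {r : Int} (hr : r ≠ 0) :
    PySem.Int.mod (pA m f r) m = pA m f r := by
  cases f with
  | zero => simp [pA, hr, pvMod_zero]
  | succ k =>
    rw [pA, if_neg hr]
    exact loopA_out m _ k ((r - 0 * 2 ^ k + 2 ^ k).toNat + 1) r 0 0 (by omega) (pvMod_zero m)

-- A's recursion satisfies exactly B's dp update rule
lemma pA_key (m : Int) (hm : m ≠ 0) (k : Nat) {r : Int} (hr : 1 ≤ r) :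
    pA m (k + 1) r
      = if 2 ^ k ≤ r
        then PySem.Int.mod (pA m k r + pA m (k + 1) (r - 2 ^ k)) m
        else pA m k r := by
  have hv : (0:Int) < 2 ^ k := pow_pos (by norm_num) k
  rw [pA, if_neg (by omega)]
  conv_lhs => rw [loopA]
  rw [if_pos (by simpa using by omega : (0:Int) * 2 ^ k ≤ r)]
  have harg : r - 0 * 2 ^ k = r := by ring
  rw [harg]
  simp only [zero_add]
  by_cases hc : 2 ^ k ≤ r
  · rw [if_pos hc]
    have hshift := loopA_shift m (fun x => pA m k x) k
      ((r - 0 * 2 ^ k + 2 ^ k).toNat + 1) r 0 (PySem.Int.mod (pA m k r) m) (by omega)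
    rw [show (0:Int) + 1 = 1 by norm_num] at hshift
    rw [hshift]
    have hacc := loopA_acc m hm (fun x => pA m k x) k
      ((r - 2 ^ k - 0 * 2 ^ k + 2 ^ k).toNat + 1) (r - 2 ^ k) 0 (pA m k r) 0 (by omega)
    rw [add_zero, pvMod_zero] at hacc
    rw [hacc]
    by_cases h0 : r - 2 ^ k = 0
    · rw [h0]
      conv_lhs => rw [loopA]
      rw [if_pos (by simp)]
      conv_lhs => rw [loopA]
      rw [if_neg (by omega)]
      rw [pvMod_addr hm]
      norm_num [pA_zero]
    · rw [show pA m (k + 1) (r - 2 ^ k) = loopA m (fun x => pA m k x) k (r - 2 ^ k) 0 0 from by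
          rw [pA, if_neg h0]]
  · rw [if_neg hc]
    conv_lhs => rw [loopA]
    rw [if_neg (by omega)]
    exact pA_mod m k (show r ≠ 0 by omega)

lemma pA_small (m : Int) (hm : m ≠ 0) (k : Nat) {j : Int} (h0 : 0 ≤ j) (hj : j < 2 ^ k) :
    pA m (k + 1) j = pA m k j := by
  rcases eq_or_lt_of_le h0 with rfl | hpos
  · rw [pA_zero, pA_zero]
  · rw [pA_key m hm k hpos, if_neg (by omega)]

-- bit_length characterisation used by the outer loop
lemma bitLength_le_iff {n : Int} (hn : 1 ≤ n) (k : Nat) :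
    n < 2 ^ k ↔ PySem.Int.bitLength n ≤ k := by
  have habs : (n.natAbs : Int) = n := by omega
  constructor
  · intro h
    by_contra hk
    have hk' : k ≤ PySem.Int.bitLength n - 1 := by omega
    have h2 := PySem.Int.two_pow_bitLength_le n (by omega)
    have hmono : (2:Nat) ^ k ≤ 2 ^ (PySem.Int.bitLength n - 1) :=
      Nat.pow_le_pow_right (by norm_num) hk'
    have hle : ((2:Nat) ^ k : Int) ≤ (n.natAbs : Int) := by exact_mod_cast le_trans hmono h2
    rw [habs] at hle
    push_cast at hle
    omega
  · intro h
    have h1 := PySem.Int.lt_two_pow_bitLength n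
    have hmono : (2:Nat) ^ PySem.Int.bitLength n ≤ 2 ^ k :=
      Nat.pow_le_pow_right (by norm_num) h
    have hlt : (n.natAbs : Int) < ((2:Nat) ^ k : Int) := by
      exact_mod_cast Nat.lt_of_lt_of_le h1 hmono
    rw [habs] at hlt
    push_cast at hlt
    omega

-- inner pass invariant
lemma inner_inv (m : Int) (hm : m ≠ 0) (n : Int) (k : Nat) :
    ∀ (N : Nat) (j : Int) (dp : List Int), (2:Int) ^ k ≤ j → (n + 1 - j).toNat < N →
      dp.length = n.toNat + 1 →
      (∀ i : Nat, i ≤ n.toNat →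
        dp.getD i 0 = if (i : Int) < j then pA m (k + 1) i else pA m k i) →
      ((PySem.List.pyRange j (n + 1) 1).foldl (stepB m (2 ^ k)) dp).length = n.toNat + 1 ∧
      (∀ i : Nat, i ≤ n.toNat →
        ((PySem.List.pyRange j (n + 1) 1).foldl (stepB m (2 ^ k)) dp).getD i 0
          = pA m (k + 1) i) := by
  intro N
  induction N with
  | zero => intro j dp hj hN hlen hinv; omega
  | succ N ih =>
    intro j dp hj hN hlen hinv
    have hv : (0:Int) < 2 ^ k := pow_pos (by norm_num) k
    by_cases hjn : j < n + 1
    · rw [PySem.List.pyRange_one_cons hjn]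
      rw [List.foldl_cons]
      have hj0 : 0 ≤ j := by omega
      have hjt : (j.toNat : Int) = j := Int.toNat_of_nonneg hj0
      have hjle : j.toNat ≤ n.toNat := by omega
      have hsub0 : 0 ≤ j - 2 ^ k := by omega
      have hsubt : ((j - 2 ^ k).toNat : Int) = j - 2 ^ k := Int.toNat_of_nonneg hsub0
      have hsuble : (j - 2 ^ k).toNat ≤ n.toNat := by omega
      have hsublt : (j - 2 ^ k).toNat < dp.length := by omega
      have hlen' : (stepB m (2 ^ k) dp j).length = n.toNat + 1 := by
        simp [stepB, hlen]
      have hstep : ∀ i : Nat, i ≤ n.toNat →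
          (stepB m (2 ^ k) dp j).getD i 0
            = if (i : Int) < j + 1 then pA m (k + 1) i else pA m k i := by
        intro i hi
        by_cases hij : i = j.toNat
        · subst hij
          have hlt : j.toNat < dp.length := by omega
          rw [stepB, List.getD_eq_getElem?_getD, List.getElem?_set_self hlt]
          have e1 : dp.getD j.toNat 0 = pA m k j := by
            rw [hinv j.toNat hjle, if_neg (by omega), hjt]
          have e2 : dp.getD (j - 2 ^ k).toNat 0 = pA m (k + 1) (j - 2 ^ k) := by
            rw [hinv (j - 2 ^ k).toNat hsuble, if_pos (by omega), hsubt]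
          rw [Option.getD_some, e1, e2, hjt]
          rw [pA_key m hm k (show (1:Int) ≤ j by omega), if_pos hj,
              if_pos (show j < j + 1 by omega)]
        · rw [stepB, List.getD_eq_getElem?_getD, List.getElem?_set_ne (by omega),
              ← List.getD_eq_getElem?_getD]
          rw [hinv i hi]
          have : ((i : Int) < j) ↔ ((i : Int) < j + 1) := by omega
          by_cases hlt : (i : Int) < j
          · rw [if_pos hlt, if_pos (by omega)]
          · rw [if_neg hlt, if_neg (by omega)]
      exact ih (j + 1) (stepB m (2 ^ k) dp j) (by omega) (by omega) hlen' hstep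
    · rw [PySem.List.pyRange_one, show (n + 1 - j).toNat = 0 by omega]
      simp only [List.range_zero, List.map_nil, List.foldl_nil]
      refine ⟨hlen, fun i hi => ?_⟩
      rw [hinv i hi, if_pos (by omega)]

-- outer loop invariant
lemma outer_inv (m : Int) (hm : m ≠ 0) (n : Int) (hn : 1 ≤ n) :
    ∀ (f : Nat) (k : Nat) (dp : List Int),
      dp.length = n.toNat + 1 →
      (∀ i : Nat, i ≤ n.toNat → dp.getD i 0 = pA m k i) →
      n < 2 ^ k * 2 ^ f →
      ∀ i : Nat, i ≤ n.toNat →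
        (outerB m n f (2 ^ k) dp).getD i 0
          = pA m (max k (PySem.Int.bitLength n)) i := by
  intro f
  induction f with
  | zero =>
    intro k dp hlen hinv hf i hi
    have hbk : PySem.Int.bitLength n ≤ k := (bitLength_le_iff hn k).mp (by omega)
    rw [outerB, hinv i hi, Nat.max_eq_left hbk]
  | succ f ih =>
    intro k dp hlen hinv hf i hi
    have hv : (0:Int) < 2 ^ k := pow_pos (by norm_num) k
    rw [outerB]
    by_cases hpn : (2:Int) ^ k ≤ n
    · rw [if_pos hpn]
      have hbk : k < PySem.Int.bitLength n := by
        by_contra hx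
        have := (bitLength_le_iff hn k).mpr (by omega)
        omega
      have hpre : ∀ i : Nat, i ≤ n.toNat →
          dp.getD i 0 = if (i : Int) < 2 ^ k then pA m (k + 1) i else pA m k i := by
        intro i hi
        rw [hinv i hi]
        by_cases hlt : (i : Int) < 2 ^ k
        · rw [if_pos hlt, pA_small m hm k (by positivity) hlt]
        · rw [if_neg hlt]
      obtain ⟨hlen', hent'⟩ := inner_inv m hm n k ((n + 1 - 2 ^ k).toNat + 1)
        (2 ^ k) dp le_rfl (by omega) hlen hpre
      have hmul : (2:Int) ^ k * 2 = 2 ^ (k + 1) := by rw [pow_succ]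
      rw [innerB, hmul]
      have hmax : max (k + 1) (PySem.Int.bitLength n) = max k (PySem.Int.bitLength n) := by
        omega
      rw [← hmax]
      exact ih (k + 1) _ hlen' hent' (by rw [pow_succ] at hf ⊢; nlinarith) i hi
    · rw [if_neg hpn]
      have hbk : PySem.Int.bitLength n ≤ k := (bitLength_le_iff hn k).mp (by omega)
      rw [hinv i hi, Nat.max_eq_left hbk]

-- ===== VERDICT (by name: the statement is the Claim_ definition above) =====
theorem partition_recursive_memo_spec : Claim_equal_partition_recursive_memo := by
  intro n m _ hpre
  unfold Spec_partition_recursive_memo partition_recursive_memo partition_recursive_memo_alt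
  by_cases hn0 : n = 0
  · subst hn0; norm_num
  · by_cases hneg : n < 0
    · rw [if_neg hn0, if_pos (by omega), if_neg hn0, pA_neg m _ hneg]
    · have hn : 1 ≤ n := by omega
      have hm : m ≠ 0 := hpre (by omega)
      rw [if_neg hn0, if_neg (by omega)]
      have hnt : ((n.toNat : Nat) : Int) = n := Int.toNat_of_nonneg (by omega)
      have hlen0 : (1 :: List.replicate n.toNat 0 : List Int).length = n.toNat + 1 := by
        simp
      have hinv0 : ∀ i : Nat, i ≤ n.toNat →
          (1 :: List.replicate n.toNat 0 : List Int).getD i 0 = pA m 0 i := by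
        intro i hi
        cases i with
        | zero => simp [pA]
        | succ i' =>
          have : i' < n.toNat := by omega
          simp [List.getD_eq_getElem?_getD, this, pA]
          omega
      have hfuel : n < 2 ^ 0 * 2 ^ (n.toNat + 1) := by
        have h1 : n.toNat < 2 ^ n.toNat := Nat.lt_two_pow_self
        have h2 : (2:Nat) ^ n.toNat ≤ 2 ^ (n.toNat + 1) := Nat.pow_le_pow_right (by norm_num) (by omega)
        have : (n.toNat : Int) < ((2:Nat) ^ (n.toNat + 1) : Int) := by exact_mod_cast Nat.lt_of_lt_of_le h1 h2
        rw [hnt] at this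
        push_cast at this
        omega
      have hmain := outer_inv m hm n hn (n.toNat + 1) 0 (1 :: List.replicate n.toNat 0)
        hlen0 hinv0 hfuel n.toNat le_rfl
      rw [show ((2:Int) ^ 0) = 1 by norm_num] at hmain
      rw [hmain, Nat.max_eq_right (by omega), hnt]
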